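-- pv_equiv track=rewrite | github.com/flymj/InferenceMAX | dashboard/llm_dashboard.py | factor_pairs_pow2
-- ===== SOURCE A (Python) =====
-- from typing import Dict, List, Tuple, Optional
--
-- def factor_pairs_pow2(n: int) -> List[Tuple[int,int]]:
--     """Return all (tp, dp) such that tp*dp=n and both are powers of 2."""
--     pairs = []
--     x = 1
--     while x <= n:
--         if (n % x) == 0:
--             y = n // x
--             if (x & (x-1)) == 0 and (y & (y-1)) == 0:  # both pow2
--                 pairs.append((x, y))
--         x <<= 1
--     return pairs
-- ===== SOURCE B (Python) =====
-- def factor_pairs_pow2(n):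
--     # Both factors being powers of 2 forces n itself to be a power of 2.
--     if n <= 0 or (n & (n - 1)) != 0:
--         return []
--     k = n.bit_length() - 1
--     return [(1 << i, n >> i) for i in range(k + 1)]
-- ===== Notes on version B (the rewrite author's own statement) =====
-- stated objective: simpler
-- what changed: B replaces A's doubling trial-division loop by the closed observation that both factors being powers of 2 forces n itself to be a power of 2: one bit-test, then the pairs (2^i, n>>i) are emitted directly by a comprehension.
import Mathlib
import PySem

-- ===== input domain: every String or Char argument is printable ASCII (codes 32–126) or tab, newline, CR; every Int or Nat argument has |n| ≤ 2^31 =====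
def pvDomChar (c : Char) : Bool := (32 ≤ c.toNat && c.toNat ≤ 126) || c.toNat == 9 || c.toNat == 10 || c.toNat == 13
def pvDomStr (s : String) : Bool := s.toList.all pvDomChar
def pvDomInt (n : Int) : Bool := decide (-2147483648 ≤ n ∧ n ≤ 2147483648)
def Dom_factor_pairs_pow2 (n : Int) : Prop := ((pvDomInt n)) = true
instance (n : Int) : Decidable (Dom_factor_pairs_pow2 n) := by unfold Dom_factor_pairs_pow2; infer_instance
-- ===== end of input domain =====

-- B replaces A's doubling trial-division loop by the observation that both factors being
-- powers of 2 forces n to be a power of 2: one bit-test, then emit (2^i, n>>i) directly.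

-- ===== PORT A =====
-- Python: while x <= n: if n % x == 0 and both x, n//x are powers of 2, append; x <<= 1.
-- The extra `0 < x` in the guard is a totality guard only: the loop is entered with x = 1
-- and x doubles, so 0 < x always holds on every reachable state.
def factorLoopA (n x : Int) (pairs : List (Int × Int)) : List (Int × Int) :=
  if _h : 0 < x ∧ x ≤ n then
    factorLoopA n (2 * x)                     -- x <<= 1
      (if PySem.Int.mod n x = 0 then          -- (n % x) == 0
        (let y := PySem.Int.floordiv n x      -- y = n // x
         if PySem.Int.band x (x - 1) = 0 ∧ PySem.Int.band y (y - 1) = 0  -- both pow2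
         then pairs ++ [(x, y)] else pairs)
       else pairs)
  else pairs
termination_by (n + 1 - x).toNat
decreasing_by omega

def factor_pairs_pow2 (n : Int) : List (Int × Int) :=
  factorLoopA n 1 []

-- ===== PORT B =====
-- if n <= 0 or (n & (n-1)) != 0: return []
-- k = n.bit_length() - 1; return [(1 << i, n >> i) for i in range(k + 1)]
-- (`1 << i` is 2^i; `n >> i` on the nonnegative n here is floor division `n / 2^i`.)
def factor_pairs_pow2_alt (n : Int) : List (Int × Int) :=
  if n ≤ 0 ∨ PySem.Int.band n (n - 1) ≠ 0 then []
  else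
    let k := PySem.Int.bitLength n - 1
    (List.range (k + 1)).map (fun i => ((2 : Int) ^ i, n / 2 ^ i))

-- ===== PRECONDITION & SPEC =====
def Spec_factor_pairs_pow2 (n : Int) (out : List (Int × Int)) : Prop := out = factor_pairs_pow2_alt n
instance (n : Int) (out : List (Int × Int)) : Decidable (Spec_factor_pairs_pow2 n out) := by unfold Spec_factor_pairs_pow2; infer_instance

-- ===== CLAIM (what is proved, stated in full; the proofs are below) =====
def Claim_equal_factor_pairs_pow2 : Prop := ∀ (n : Int), Dom_factor_pairs_pow2 n → Spec_factor_pairs_pow2 n (factor_pairs_pow2 n)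

-- ===== LEMMAS AND PROOFS =====

-- A positive number with `y & (y-1) == 0` is exactly a power of two (Nat side).
lemma land_pred_eq_zero_iff_pow2 : ∀ y : Nat, 0 < y → (y &&& (y - 1) = 0 ↔ ∃ m : Nat, y = 2 ^ m) := by
  intro y
  induction y using Nat.strong_induction_on with
  | _ y ih =>
    intro hy
    constructor
    · intro h
      rcases Nat.even_or_odd y with he | ho
      · obtain ⟨a, ha⟩ := he
        have hapos : 0 < a := by omega
        have h0 : a &&& (a - 1) = 0 := by
          apply Nat.eq_of_testBit_eq
          intro i
          rw [Nat.zero_testBit, Nat.testBit_and]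
          have hcong := congrArg (fun z => Nat.testBit z (i + 1)) h
          simp only [Nat.zero_testBit, Nat.testBit_and] at hcong
          rw [Nat.testBit_add_one, Nat.testBit_add_one] at hcong
          have e1 : y / 2 = a := by omega
          have e2 : (y - 1) / 2 = a - 1 := by omega
          rwa [e1, e2] at hcong
        obtain ⟨m, hm⟩ := (ih a (by omega) hapos).mp h0
        exact ⟨m + 1, by rw [pow_succ]; omega⟩
      · by_cases h1 : y = 1
        · exact ⟨0, by simp [h1]⟩
        · exfalso
          obtain ⟨b, hb⟩ := ho
          have hbpos : 0 < b := by omega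
          obtain ⟨i, hi, -⟩ := Nat.exists_most_significant_bit (show b ≠ 0 by omega)
          have ht : (y &&& (y - 1)).testBit (i + 1) = true := by
            rw [Nat.testBit_and, Nat.testBit_add_one, Nat.testBit_add_one]
            have e1 : y / 2 = b := by omega
            have e2 : (y - 1) / 2 = b := by omega
            rw [e1, e2, hi]; rfl
          rw [h, Nat.zero_testBit] at ht
          exact Bool.false_ne_true ht
    · rintro ⟨m, rfl⟩
      have : (2 ^ m) &&& (2 ^ m - 1) = 2 ^ m % 2 ^ m := Nat.and_two_pow_sub_one_eq_mod (2 ^ m) m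
      rw [this, Nat.mod_self]

-- Int version, phrased on PySem.Int.band.
lemma band_pred_eq_zero_iff_pow2 (y : Int) (hy : 0 < y) :
    (PySem.Int.band y (y - 1) = 0 ↔ ∃ m : Nat, y = 2 ^ m) := by
  rw [PySem.Int.band_of_nonneg (by omega) (by omega)]
  have e1 : (y - 1).toNat = y.toNat - 1 := by omega
  rw [e1]
  constructor
  · intro h
    have hN : y.toNat &&& (y.toNat - 1) = 0 := by exact_mod_cast h
    obtain ⟨m, hm⟩ := (land_pred_eq_zero_iff_pow2 y.toNat (by omega) ).mp hN
    refine ⟨m, ?_⟩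
    have : (y.toNat : Int) = ((2 ^ m : Nat) : Int) := by exact_mod_cast hm
    push_cast at this
    omega
  · rintro ⟨m, rfl⟩
    have e2 : ((2 : Int) ^ m).toNat = 2 ^ m := by
      have : ((2 : Int) ^ m) = ((2 ^ m : Nat) : Int) := by push_cast; ring
      rw [this, Int.toNat_natCast]
    rw [e2]
    have : (2 ^ m) &&& (2 ^ m - 1) = 2 ^ m % 2 ^ m := Nat.and_two_pow_sub_one_eq_mod (2 ^ m) m
    rw [this, Nat.mod_self]
    rfl

lemma band_pow2_pred (m : Nat) : PySem.Int.band ((2 : Int) ^ m) ((2 : Int) ^ m - 1) = 0 :=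
  (band_pred_eq_zero_iff_pow2 _ (by positivity)).mpr ⟨m, rfl⟩

-- bit_length of a power of two.
lemma bitLength_two_pow (m : Nat) : PySem.Int.bitLength ((2 : Int) ^ m) = m + 1 := by
  set L := PySem.Int.bitLength ((2 : Int) ^ m) with hL
  have habs : ((2 : Int) ^ m).natAbs = 2 ^ m := by
    have : ((2 : Int) ^ m) = ((2 ^ m : Nat) : Int) := by push_cast; ring
    rw [this, Int.natAbs_natCast]
  have h1 : 2 ^ m < 2 ^ L := by
    have := PySem.Int.lt_two_pow_bitLength ((2 : Int) ^ m)
    rwa [habs] at this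
  have h2 : 2 ^ (L - 1) ≤ 2 ^ m := by
    have := PySem.Int.two_pow_bitLength_le ((2 : Int) ^ m) (by positivity)
    rwa [habs] at this
  have hm : m < L := (Nat.pow_lt_pow_iff_right (by norm_num)).mp h1
  have hl : L - 1 ≤ m := (Nat.pow_le_pow_iff_right (by norm_num)).mp h2
  omega

-- The loop on a power-of-two n = 2^k, from x = 2^j, emits (2^(j+i), 2^(k-j-i)).
lemma factorLoopA_pow2 (k : Nat) : ∀ d j : Nat, ∀ pairs : List (Int × Int), j + d = k →
    factorLoopA ((2 : Int) ^ k) ((2 : Int) ^ j) pairs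
      = pairs ++ (List.range (d + 1)).map (fun i => ((2 : Int) ^ (j + i), (2 : Int) ^ (k - j - i))) := by
  intro d
  induction d with
  | zero =>
    intro j pairs hj
    have hk : j = k := by omega
    subst hk
    rw [factorLoopA]
    have hpos : (0 : Int) < 2 ^ j := by positivity
    rw [dif_pos ⟨hpos, le_refl _⟩]
    have hmod : PySem.Int.mod ((2 : Int) ^ j) ((2 : Int) ^ j) = 0 :=
      (PySem.Int.mod_eq_zero_iff_dvd _ _).mpr dvd_rfl
    rw [if_pos hmod]
    have hdiv : PySem.Int.floordiv ((2 : Int) ^ j) ((2 : Int) ^ j) = 1 := by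
      rw [PySem.Int.floordiv_eq_ediv_of_pos hpos, Int.ediv_self (by positivity)]
    simp only [hdiv]
    rw [if_pos ⟨band_pow2_pred j, by norm_num⟩]
    rw [factorLoopA]
    have hstop : ¬ ((0 : Int) < 2 * 2 ^ j ∧ 2 * (2 : Int) ^ j ≤ 2 ^ j) := by
      intro hc; rcases hc with ⟨-, hc⟩; omega
    rw [dif_neg hstop]
    simp [List.range_one]
  | succ d ihd =>
    intro j pairs hj
    have hle : (2 : Int) ^ j ≤ 2 ^ k := by
      apply pow_le_pow_right₀ (by norm_num) (by omega)
    have hpos : (0 : Int) < 2 ^ j := by positivity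
    rw [factorLoopA, dif_pos ⟨hpos, hle⟩]
    have hdvd : ((2 : Int) ^ j) ∣ 2 ^ k := pow_dvd_pow 2 (by omega)
    have hmod : PySem.Int.mod ((2 : Int) ^ k) ((2 : Int) ^ j) = 0 :=
      (PySem.Int.mod_eq_zero_iff_dvd _ _).mpr hdvd
    rw [if_pos hmod]
    have hsplit : (2 : Int) ^ k = 2 ^ (k - j) * 2 ^ j := by
      rw [← pow_add]; congr 1; omega
    have hdiv : PySem.Int.floordiv ((2 : Int) ^ k) ((2 : Int) ^ j) = 2 ^ (k - j) := by
      rw [PySem.Int.floordiv_eq_ediv_of_pos hpos, hsplit,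
        Int.mul_ediv_cancel _ (by positivity)]
    simp only [hdiv]
    rw [if_pos ⟨band_pow2_pred j, band_pow2_pred (k - j)⟩]
    have hx : (2 : Int) * 2 ^ j = 2 ^ (j + 1) := by rw [pow_succ]; ring
    rw [hx, ihd (j + 1) _ (by omega)]
    conv_rhs => rw [List.range_succ_eq_map]
    rw [List.map_cons, List.map_map, List.append_assoc, List.singleton_append]
    congr 2
    norm_num
    intro a ha
    constructor <;> omega

-- On a positive non-power-of-two n the loop never appends.
lemma factorLoopA_not_pow2 (n : Int) (hn : 0 < n) (hnp : ¬ ∃ m : Nat, n = 2 ^ m) :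
    ∀ t j : Nat, ∀ pairs : List (Int × Int), (n + 1 - 2 ^ j).toNat = t →
      factorLoopA n ((2 : Int) ^ j) pairs = pairs := by
  intro t
  induction t using Nat.strong_induction_on with
  | _ t ih =>
    intro j pairs ht
    rw [factorLoopA]
    have hpos : (0 : Int) < 2 ^ j := by positivity
    by_cases hle : (2 : Int) ^ j ≤ n
    · rw [dif_pos ⟨hpos, hle⟩]
      have hbody : (if PySem.Int.mod n ((2 : Int) ^ j) = 0 then
          (let y := PySem.Int.floordiv n ((2 : Int) ^ j)
           if PySem.Int.band ((2 : Int) ^ j) ((2 : Int) ^ j - 1) = 0 ∧ PySem.Int.band y (y - 1) = 0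
           then pairs ++ [((2 : Int) ^ j, y)] else pairs)
         else pairs) = pairs := by
        by_cases hmod : PySem.Int.mod n ((2 : Int) ^ j) = 0
        · rw [if_pos hmod]
          have hdvd : ((2 : Int) ^ j) ∣ n := (PySem.Int.mod_eq_zero_iff_dvd _ _).mp hmod
          set y := PySem.Int.floordiv n ((2 : Int) ^ j) with hy
          have hyv : y = n / 2 ^ j := PySem.Int.floordiv_eq_ediv_of_pos hpos
          have hny : n = 2 ^ j * y := by
            rw [hyv, mul_comm]
            exact (Int.ediv_mul_cancel hdvd).symm
          have hypos : 0 < y := by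
            by_contra hc
            push Not at hc
            have : 2 ^ j * y ≤ 0 := mul_nonpos_of_nonneg_of_nonpos (le_of_lt hpos) hc
            linarith
          have hnot : ¬ PySem.Int.band y (y - 1) = 0 := by
            intro hb
            obtain ⟨m, hm⟩ := (band_pred_eq_zero_iff_pow2 y hypos).mp hb
            exact hnp ⟨j + m, by rw [hny, hm, pow_add]⟩
          rw [if_neg (fun hc => hnot hc.2)]
        · rw [if_neg hmod]
      rw [hbody]
      have hx : (2 : Int) * 2 ^ j = 2 ^ (j + 1) := by rw [pow_succ]; ring
      rw [hx]
      apply ih _ _ (j + 1) pairs rfl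
      have h1 : (1 : Int) ≤ 2 ^ j := hpos
      have h2 : (2 : Int) ^ (j + 1) = 2 * 2 ^ j := by rw [pow_succ]; ring
      omega
    · rw [dif_neg (by intro hc; exact hle hc.2)]

-- ===== VERDICT (by name: the statement is the Claim_ definition above) =====
theorem factor_pairs_pow2_spec : Claim_equal_factor_pairs_pow2 := by
  intro n _
  unfold Spec_factor_pairs_pow2 factor_pairs_pow2 factor_pairs_pow2_alt
  by_cases hn : 0 < n
  · by_cases hband : PySem.Int.band n (n - 1) = 0
    · -- n is a power of two
      obtain ⟨m, rfl⟩ := (band_pred_eq_zero_iff_pow2 n hn).mp hband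
      rw [if_neg (by
        rintro (h | h)
        · exact absurd h (not_le.mpr hn)
        · exact h hband)]
      have h1 : (1 : Int) = 2 ^ (0 : Nat) := by norm_num
      rw [h1, factorLoopA_pow2 m m 0 [] (by omega)]
      rw [bitLength_two_pow]
      simp only [Nat.add_sub_cancel, List.nil_append, Nat.zero_add, Nat.sub_zero]
      apply List.map_congr_left
      intro i hi
      rw [List.mem_range] at hi
      have hsplit : (2 : Int) ^ m = 2 ^ (m - i) * 2 ^ i := by
        rw [← pow_add]; congr 1; omega
      rw [hsplit, Int.mul_ediv_cancel _ (by positivity)]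
    · -- positive but not a power of two: both sides are []
      rw [if_pos (Or.inr hband)]
      have hnp : ¬ ∃ m : Nat, n = 2 ^ m := fun h =>
        hband ((band_pred_eq_zero_iff_pow2 n hn).mpr h)
      have h1 : (1 : Int) = 2 ^ (0 : Nat) := by norm_num
      rw [h1, factorLoopA_not_pow2 n hn hnp _ 0 [] rfl]
  · -- n ≤ 0: the loop body never runs, B returns [] immediately
    rw [if_pos (Or.inl (by omega))]
    rw [factorLoopA, dif_neg (by intro ⟨h1, h2⟩; omega)]
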